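-- pv_equiv track=rewrite | github.com/Charlunn/profit-corp-hermes | scripts/generate_operating_visibility.py | build_action_list
-- ===== SOURCE A (Python) =====
-- def build_action_list(operating_actions: list[str], governance_actions: list[str]) -> list[str]:
--     merged: list[str] = []
--     seen: set[str] = set()
--     for item in governance_actions + [f"- {action}" if not action.startswith("- ") else action for action in operating_actions]:
--         if item in seen:
--             continue
--         seen.add(item)
--         merged.append(item)
--         if len(merged) == 3:
--             break
--     return merged
-- ===== SOURCE B (Python) =====
-- def build_action_list(operating_actions: list[str], governance_actions: list[str]) -> list[str]:
--     combined = governance_actions + [a if a.startswith("- ") else f"- {a}" for a in operating_actions]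
--
--     def pick(items: list[str], k: int) -> list[str]:
--         if k == 0 or not items:
--             return []
--         head = items[0]
--         return [head] + pick([x for x in items[1:] if x != head], k - 1)
--
--     return pick(combined, 3)
-- ===== Notes on version B (the rewrite author's own statement) =====
-- stated objective: alternative
-- what changed: Replaces A's single pass with a seen-set, membership branch and early break by a recursive selection that takes the head, filters all its later duplicates out of the tail, and recurses with a countdown of 3 - no auxiliary set or membership state at all.
import Mathlib
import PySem

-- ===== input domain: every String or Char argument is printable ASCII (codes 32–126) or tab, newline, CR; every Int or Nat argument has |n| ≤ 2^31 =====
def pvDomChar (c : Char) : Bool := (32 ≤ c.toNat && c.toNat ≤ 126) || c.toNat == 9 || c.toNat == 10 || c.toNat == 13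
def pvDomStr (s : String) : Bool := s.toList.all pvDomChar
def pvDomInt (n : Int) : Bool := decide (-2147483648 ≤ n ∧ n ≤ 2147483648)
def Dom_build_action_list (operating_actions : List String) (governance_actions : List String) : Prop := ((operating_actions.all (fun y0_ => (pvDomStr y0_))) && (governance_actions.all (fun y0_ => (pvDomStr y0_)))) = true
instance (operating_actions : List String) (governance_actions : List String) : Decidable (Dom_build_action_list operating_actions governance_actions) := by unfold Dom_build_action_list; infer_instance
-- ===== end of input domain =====

-- B replaces A's seen-set loop by a recursive selection (take head, filter its duplicates from the tail, countdown from 3); alternative decomposition, same cost.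

-- ===== PORT A =====
-- normalization of one operating action: f"- {action}" if not action.startswith("- ") else action
def pvNorm (action : String) : String :=
  if ¬ (PySem.Str.startswith action "- " = true) then "- " ++ action else action

-- A's for-loop: seen as a PySem.Set, merged appended, break at len(merged) == 3
def pvLoopA : List String → PySem.Set String → List String → List String
  | [], _, merged => merged
  | item :: rest, seen, merged =>
    if PySem.Set.contains seen item then pvLoopA rest seen merged
    else
      let merged' := merged ++ [item]
      if merged'.length = 3 then merged'
      else pvLoopA rest (PySem.Set.add seen item) merged'

def build_action_list (operating_actions : List String) (governance_actions : List String) : List String :=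
  pvLoopA (governance_actions ++ operating_actions.map pvNorm) PySem.Set.empty []

-- ===== PORT B =====
-- B's normalization: a if a.startswith("- ") else f"- {a}"
def pvNormB (a : String) : String :=
  if PySem.Str.startswith a "- " = true then a else "- " ++ a

-- B's recursive pick: if k == 0 or not items: []; else head, filter head out of the tail, recurse
def pvPick : List String → Nat → List String
  | _, 0 => []
  | [], _ + 1 => []
  | head :: t, k + 1 => head :: pvPick (t.filter (fun x => x != head)) k
termination_by _ k => k

def build_action_list_alt (operating_actions : List String) (governance_actions : List String) : List String :=
  let combined := governance_actions ++ operating_actions.map pvNormB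
  pvPick combined 3

-- ===== PRECONDITION & SPEC =====
def Spec_build_action_list (operating_actions : List String) (governance_actions : List String) (out : List String) : Prop := out = build_action_list_alt operating_actions governance_actions
instance (operating_actions : List String) (governance_actions : List String) (out : List String) : Decidable (Spec_build_action_list operating_actions governance_actions out) := by unfold Spec_build_action_list; infer_instance

-- ===== CLAIM (what is proved, stated in full; the proofs are below) =====
def Claim_equal_build_action_list : Prop := ∀ (operating_actions : List String) (governance_actions : List String), Dom_build_action_list operating_actions governance_actions → Spec_build_action_list operating_actions governance_actions (build_action_list operating_actions governance_actions)

-- ===== LEMMAS AND PROOFS =====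

theorem pvPick_nil (k : Nat) : pvPick [] k = [] := by
  cases k <;> simp [pvPick]

theorem pvNorm_eq_pvNormB : pvNorm = pvNormB := by
  funext a
  simp only [pvNorm, pvNormB, PySem.Str.startswith]
  cases hb : PySem.Chars.startswith a.toList ['-', ' '] <;> simp [hb]

-- core invariant: A's loop state (seen = merged = acc, |acc| < 3) equals acc ++ B's pick on the acc-filtered tail
theorem pv_loop_pick (L : List String) (acc : List String) (h : acc.length < 3) :
    pvLoopA L acc acc = acc ++ pvPick (L.filter (fun x => !acc.contains x)) (3 - acc.length) := by
  induction L generalizing acc with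
  | nil => simp [pvLoopA, pvPick_nil]
  | cons item rest ih =>
    by_cases hm : acc.contains item
    · have hmem : item ∈ acc := by simpa using hm
      simp [pvLoopA, PySem.Set.contains, hmem, ih acc h]
    · have hmem : item ∉ acc := by simpa using hm
      have hc : PySem.Set.contains acc item = false := by
        simp [PySem.Set.contains, hmem]
      have hk : 3 - acc.length = (2 - acc.length) + 1 := by omega
      have hfc : (item :: rest).filter (fun x => !acc.contains x)
          = item :: rest.filter (fun x => !acc.contains x) := by
        simp [hmem]
      have hfil : rest.filter (fun x => !(acc ++ [item]).contains x)
          = (rest.filter (fun x => !acc.contains x)).filter (fun x => x != item) := by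
        rw [List.filter_filter]
        apply List.filter_congr
        intro x _
        simp only [List.contains_eq_mem, List.mem_append, List.mem_singleton, bne]
        by_cases h1 : x ∈ acc <;> by_cases h2 : x = item <;> simp [h1, h2]
      by_cases hl : acc.length = 2
      · have h3 : (acc ++ [item]).length = 3 := by simp [hl]
        rw [hfc, hk]
        simp only [pvLoopA, hc, Bool.false_eq_true, if_false, h3, if_true, pvPick, hl]
        simp [pvPick]
      · have hadd : PySem.Set.add acc item = acc ++ [item] := by
          simp [PySem.Set.add, PySem.Set.contains, hmem]
        have h3 : ¬ (acc ++ [item]).length = 3 := by simp; omega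
        have h' : (acc ++ [item]).length < 3 := by simp; omega
        have hrec := ih (acc ++ [item]) h'
        rw [hfil] at hrec
        have hk2 : 3 - (acc ++ [item]).length = 2 - acc.length := by simp only [List.length_append, List.length_cons, List.length_nil]; omega
        rw [hk2] at hrec
        rw [hfc, hk]
        simp only [pvLoopA, hc, Bool.false_eq_true, if_false, h3, hadd, pvPick]
        rw [hrec]
        simp

-- ===== VERDICT (by name: the statement is the Claim_ definition above) =====
theorem build_action_list_spec : Claim_equal_build_action_list := by
  intro op gov _
  show pvLoopA (gov ++ op.map pvNorm) PySem.Set.empty [] =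
    build_action_list_alt op gov
  have := pv_loop_pick (gov ++ op.map pvNorm) [] (by simp)
  simpa [build_action_list_alt, pvNorm_eq_pvNormB, PySem.Set.empty] using this
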